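-- pv_equiv track=rewrite | github.com/JacobHerbstman/TIF | tasks/tif_pdf_projected_realized/code/extract_projected_realized_from_pdfs.py | infer_status
-- ===== SOURCE A (Python) =====
-- PROJECTED_KEYWORDS = [
--     "projected",
--     "estimate",
--     "estimated",
--     "budget",
--     "budgeted",
--     "anticipated",
--     "expected",
--     "proposed",
--     "planned",
--     "target",
--     "projection",
-- ]
--
-- REALIZED_KEYWORDS = [
--     "actual",
--     "realized",
--     "final",
--     "completed",
--     "completion",
--     "incurred",
--     "spent",
--     "expenditure",
--     "delivered",
-- ]
--
-- def keyword_positions(text, keywords):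
--     positions = []
--     lower = text.lower()
--     for kw in keywords:
--         start = 0
--         while True:
--             idx = lower.find(kw, start)
--             if idx < 0:
--                 break
--             positions.append((idx, kw))
--             start = idx + 1
--     positions.sort(key=lambda x: x[0])
--     return positions
--
-- def infer_status(text, token_pos):
--     all_positions = keyword_positions(text, PROJECTED_KEYWORDS) + keyword_positions(text, REALIZED_KEYWORDS)
--     if not all_positions:
--         return ""
--
--     best_kw = ""
--     best_dist = 10**9
--     for pos, kw in all_positions:
--         dist = abs(pos - token_pos)
--         if dist < best_dist:
--             best_dist = dist
--             best_kw = kw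
--
--     if best_kw in PROJECTED_KEYWORDS:
--         return "projected"
--     if best_kw in REALIZED_KEYWORDS:
--         return "realized"
--     return ""
-- ===== SOURCE B (Python) =====
-- PROJECTED_KEYWORDS = [
--     "projected",
--     "estimate",
--     "estimated",
--     "budget",
--     "budgeted",
--     "anticipated",
--     "expected",
--     "proposed",
--     "planned",
--     "target",
--     "projection",
-- ]
--
-- REALIZED_KEYWORDS = [
--     "actual",
--     "realized",
--     "final",
--     "completed",
--     "completion",
--     "incurred",
--     "spent",
--     "expenditure",
--     "delivered",
-- ]
--
-- _INF = 10 ** 9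
--
-- def _min_dist(lower, keywords, token_pos):
--     best = _INF
--     for kw in keywords:
--         idx = lower.find(kw)
--         while idx >= 0:
--             best = min(best, abs(idx - token_pos))
--             idx = lower.find(kw, idx + 1)
--     return best
--
-- def infer_status(text, token_pos):
--     lower = text.lower()
--     pd = _min_dist(lower, PROJECTED_KEYWORDS, token_pos)
--     rd = _min_dist(lower, REALIZED_KEYWORDS, token_pos)
--     if pd >= _INF and rd >= _INF:
--         return ""
--     return "projected" if pd <= rd else "realized"
-- ===== Notes on version B (the rewrite author's own statement) =====
-- stated objective: simpler
-- what changed: Instead of collecting, sorting and concatenating all (position, keyword) pairs and scanning for the globally nearest keyword, B computes two independent minima of |pos - token_pos| (one over projected-keyword occurrences, one over realized ones, both capped at the 10**9 sentinel) and classifies by comparing them, with '<=' reproducing A's projected-wins-on-tie behaviour.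
import Mathlib
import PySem

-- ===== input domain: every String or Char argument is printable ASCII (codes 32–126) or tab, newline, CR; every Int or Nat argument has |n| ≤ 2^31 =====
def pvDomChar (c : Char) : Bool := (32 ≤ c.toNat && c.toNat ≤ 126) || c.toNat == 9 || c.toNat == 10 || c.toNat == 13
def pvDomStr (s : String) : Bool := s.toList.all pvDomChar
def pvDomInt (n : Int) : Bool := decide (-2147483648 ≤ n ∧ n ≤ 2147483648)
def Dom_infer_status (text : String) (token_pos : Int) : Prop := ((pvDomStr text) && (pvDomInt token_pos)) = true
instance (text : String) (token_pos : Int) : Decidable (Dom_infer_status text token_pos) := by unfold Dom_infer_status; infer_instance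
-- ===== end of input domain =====

-- B replaces A's build-sort-concatenate-and-scan pipeline by two independent capped minima
-- (projected distance, realized distance) compared with '≤' (A's projected-wins-on-tie): simpler.

-- ===== PORT A =====
def PROJECTED_KEYWORDS : List String :=
  ["projected", "estimate", "estimated", "budget", "budgeted", "anticipated",
   "expected", "proposed", "planned", "target", "projection"]

def REALIZED_KEYWORDS : List String :=
  ["actual", "realized", "final", "completed", "completion", "incurred",
   "spent", "expenditure", "delivered"]

-- inner while-loop of keyword_positions; start strictly increases, fuel = len(lower)+2 suffices
def kwFindLoop (lower : List Char) (kw : String) (start : Nat) : Nat → List (Int × String)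
  | 0 => []
  | fuel + 1 =>
    let idx := PySem.Chars.findFrom lower kw.toList (start : Int) none
    if idx < 0 then []
    else (idx, kw) :: kwFindLoop lower kw (idx.toNat + 1) fuel

def keyword_positions (text : String) (keywords : List String) : List (Int × String) :=
  let lower := PySem.Chars.lower text.toList
  let positions := keywords.foldl (fun acc kw => acc ++ kwFindLoop lower kw 0 (lower.length + 2)) []
  PySem.List.sorted positions (fun x => x.1)

def infer_status (text : String) (token_pos : Int) : String :=
  let all_positions := keyword_positions text PROJECTED_KEYWORDS ++ keyword_positions text REALIZED_KEYWORDS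
  if all_positions.isEmpty then ""
  else
    let best := all_positions.foldl
      (fun (b : Int × String) p => if |p.1 - token_pos| < b.1 then (|p.1 - token_pos|, p.2) else b)
      ((1000000000 : Int), "")
    if PROJECTED_KEYWORDS.contains best.2 then "projected"
    else if REALIZED_KEYWORDS.contains best.2 then "realized"
    else ""

-- ===== PORT B =====
-- inner while-loop of _min_dist: same find-driven iteration, but keeps only the running minimum
def minDistLoop (lower : List Char) (kw : String) (token_pos : Int) (start : Nat) : Nat → Int → Int
  | 0, best => best
  | fuel + 1, best =>
    let idx := PySem.Chars.findFrom lower kw.toList (start : Int) none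
    if idx < 0 then best
    else minDistLoop lower kw token_pos (idx.toNat + 1) fuel (min best |idx - token_pos|)

def min_dist (lower : List Char) (keywords : List String) (token_pos : Int) : Int :=
  keywords.foldl (fun best kw => minDistLoop lower kw token_pos 0 (lower.length + 2) best)
    ((1000000000 : Int))

def infer_status_alt (text : String) (token_pos : Int) : String :=
  let lower := PySem.Chars.lower text.toList
  let pd := min_dist lower PROJECTED_KEYWORDS token_pos
  let rd := min_dist lower REALIZED_KEYWORDS token_pos
  if (1000000000 : Int) ≤ pd ∧ (1000000000 : Int) ≤ rd then ""
  else if pd ≤ rd then "projected"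
  else "realized"

-- ===== PRECONDITION & SPEC =====
def Spec_infer_status (text : String) (token_pos : Int) (out : String) : Prop := out = infer_status_alt text token_pos
instance (text : String) (token_pos : Int) (out : String) : Decidable (Spec_infer_status text token_pos out) := by unfold Spec_infer_status; infer_instance

-- ===== CLAIM (what is proved, stated in full; the proofs are below) =====
def Claim_equal_infer_status : Prop := ∀ (text : String) (token_pos : Int), Dom_infer_status text token_pos → Spec_infer_status text token_pos (infer_status text token_pos)

-- ===== LEMMAS AND PROOFS =====

-- distance of an occurrence pair from token_pos, and A's strict-improvement scan step
def pvDist (tp : Int) (p : Int × String) : Int := |p.1 - tp|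
def pvStep (tp : Int) (b p : Int × String) : Int × String :=
  if |p.1 - tp| < b.1 then (|p.1 - tp|, p.2) else b

theorem foldl_min_perm {l₁ l₂ : List Int} (h : l₁.Perm l₂) (a : Int) :
    l₁.foldl min a = l₂.foldl min a := by
  induction h generalizing a with
  | nil => rfl
  | cons x _ ih => simp only [List.foldl_cons]; exact ih _
  | swap x y l => simp only [List.foldl_cons, min_right_comm]
  | trans _ _ ih₁ ih₂ => rw [ih₁, ih₂]

theorem foldl_min_min (l : List Int) (a b : Int) :
    l.foldl min (min a b) = min a (l.foldl min b) := by
  induction l generalizing b with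
  | nil => rfl
  | cons c l ih => simp only [List.foldl_cons, min_assoc]; exact ih _

theorem scan_fst (tp : Int) (L : List (Int × String)) (s : Int × String) :
    (L.foldl (pvStep tp) s).1 = L.foldl (fun b p => min b (pvDist tp p)) s.1 := by
  induction L generalizing s with
  | nil => rfl
  | cons p L ih =>
    simp only [List.foldl_cons, ih, pvStep, pvDist]
    split_ifs with h
    · congr 1; omega
    · congr 1; omega

theorem scan_fst_le (tp : Int) (L : List (Int × String)) (s : Int × String) :
    (L.foldl (pvStep tp) s).1 ≤ s.1 := by
  rw [scan_fst]
  have h := (PySem.List.foldl_min_le (L.map (pvDist tp)) s.1).1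
  rwa [List.foldl_map] at h

theorem scan_fix (tp : Int) (L : List (Int × String)) (s : Int × String)
    (h : (L.foldl (pvStep tp) s).1 = s.1) : L.foldl (pvStep tp) s = s := by
  induction L generalizing s with
  | nil => rfl
  | cons p L ih =>
    by_cases hd : |p.1 - tp| < s.1
    · exfalso
      have hs : pvStep tp s p = (|p.1 - tp|, p.2) := by simp [pvStep, hd]
      have hle := scan_fst_le tp L (pvStep tp s p)
      simp only [List.foldl_cons] at h
      rw [hs] at hle h
      simp only at hle
      omega
    · have hs : pvStep tp s p = s := by simp [pvStep, hd]
      simp only [List.foldl_cons, hs] at h ⊢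
      exact ih s h

theorem scan_mem (tp : Int) (L : List (Int × String)) (s : Int × String)
    (h : (L.foldl (pvStep tp) s).1 < s.1) : (L.foldl (pvStep tp) s).2 ∈ L.map Prod.snd := by
  induction L generalizing s with
  | nil => simp only [List.foldl_nil] at h; omega
  | cons p L ih =>
    simp only [List.foldl_cons, List.map_cons]
    by_cases hd : |p.1 - tp| < s.1
    · have hs : pvStep tp s p = (|p.1 - tp|, p.2) := by simp [pvStep, hd]
      rw [hs]
      by_cases h2 : (L.foldl (pvStep tp) (|p.1 - tp|, p.2)).1 < |p.1 - tp|
      · exact List.mem_cons_of_mem _ (ih _ h2)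
      · have hle := scan_fst_le tp L (|p.1 - tp|, p.2)
        simp only at hle
        have hfix : (L.foldl (pvStep tp) (|p.1 - tp|, p.2)).1 = |p.1 - tp| := by omega
        rw [scan_fix tp L _ hfix]
        exact List.mem_cons_self
    · have hs : pvStep tp s p = s := by simp [pvStep, hd]
      rw [hs]
      simp only [List.foldl_cons, hs] at h
      exact List.mem_cons_of_mem _ (ih s h)

theorem kwFindLoop_snd (lower : List Char) (kw : String) :
    ∀ fuel start p, p ∈ kwFindLoop lower kw start fuel → p.2 = kw := by
  intro fuel
  induction fuel with
  | zero => intro start p hp; simp [kwFindLoop] at hp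
  | succ n ih =>
    intro start p hp
    simp only [kwFindLoop] at hp
    split at hp
    · simp at hp
    · rcases List.mem_cons.1 hp with h | h
      · rw [h]
      · exact ih _ _ h

theorem minDistLoop_eq (lower : List Char) (kw : String) (tp : Int) :
    ∀ fuel start best, minDistLoop lower kw tp start fuel best
      = (kwFindLoop lower kw start fuel).foldl (fun b p => min b (pvDist tp p)) best := by
  intro fuel
  induction fuel with
  | zero => intro start best; rfl
  | succ n ih =>
    intro start best
    simp only [minDistLoop, kwFindLoop]
    by_cases h : PySem.Chars.findFrom lower kw.toList (start : Int) none < 0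
    · simp [h]
    · simp only [h, ite_false, List.foldl_cons, ih, pvDist]

theorem foldl_flatMap' {α β γ : Type} (f : α → List β) (g : γ → β → γ) :
    ∀ (K : List α) (b : γ), (K.flatMap f).foldl g b = K.foldl (fun b kw => (f kw).foldl g b) b := by
  intro K
  induction K with
  | nil => intro b; rfl
  | cons k K ih => intro b; simp only [List.flatMap_cons, List.foldl_append, List.foldl_cons, ih]

-- fold of g over the sorted list = fold over the unsorted list (min is permutation-invariant)
theorem foldl_g_sorted (tp : Int) (X : List (Int × String)) (a : Int) :
    (PySem.List.sorted X (fun x => x.1) false).foldl (fun b p => min b (pvDist tp p)) a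
      = X.foldl (fun b p => min b (pvDist tp p)) a := by
  rw [← List.foldl_map (f := pvDist tp) (g := min), ← List.foldl_map (f := pvDist tp) (g := min)]
  exact foldl_min_perm ((PySem.List.sorted_perm X (fun x => x.1) false).map (pvDist tp)) a

-- B's min_dist, computed on A's sorted occurrence list
theorem min_dist_eq (text : String) (K : List String) (tp : Int) :
    min_dist (PySem.Chars.lower text.toList) K tp
      = (keyword_positions text K).foldl (fun b p => min b (pvDist tp p)) 1000000000 := by
  unfold min_dist keyword_positions
  simp only [minDistLoop_eq, PySem.List.foldl_append_eq_flatMap, List.nil_append]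
  rw [foldl_g_sorted, foldl_flatMap']

theorem foldl_g_le (tp : Int) (L : List (Int × String)) (a : Int) :
    L.foldl (fun b p => min b (pvDist tp p)) a ≤ a := by
  have h := (PySem.List.foldl_min_le (L.map (pvDist tp)) a).1
  rwa [List.foldl_map] at h

theorem keyword_positions_snd (text : String) (K : List String) (s : String)
    (h : s ∈ (keyword_positions text K).map Prod.snd) : s ∈ K := by
  unfold keyword_positions at h
  simp only [PySem.List.foldl_append_eq_flatMap, List.nil_append] at h
  rcases List.mem_map.1 h with ⟨p, hp, hps⟩
  rw [(PySem.List.sorted_perm _ _ _).mem_iff] at hp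
  rcases List.mem_flatMap.1 hp with ⟨kw, hkw, hpk⟩
  rw [← hps, kwFindLoop_snd _ _ _ _ _ hpk]
  exact hkw

theorem infer_status_eq_alt (text : String) (token_pos : Int) :
    infer_status text token_pos = infer_status_alt text token_pos := by
  have hProj : ∀ s ∈ PROJECTED_KEYWORDS, PROJECTED_KEYWORDS.contains s = true := by decide
  have hReal1 : ∀ s ∈ REALIZED_KEYWORDS, REALIZED_KEYWORDS.contains s = true := by decide
  have hReal2 : ∀ s ∈ REALIZED_KEYWORDS, PROJECTED_KEYWORDS.contains s = false := by decide
  simp only [infer_status, infer_status_alt]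
  rw [show (fun (b : Int × String) p =>
        if |p.1 - token_pos| < b.1 then (|p.1 - token_pos|, p.2) else b) = pvStep token_pos from rfl]
  rw [min_dist_eq, min_dist_eq]
  set g := fun (b : Int) (p : Int × String) => min b (pvDist token_pos p) with hg
  set P := keyword_positions text PROJECTED_KEYWORDS with hP
  set R := keyword_positions text REALIZED_KEYWORDS with hR
  set pd := P.foldl g 1000000000 with hpd
  set rd := R.foldl g 1000000000 with hrd
  have hple : pd ≤ 1000000000 := foldl_g_le token_pos P 1000000000
  have hrle : rd ≤ 1000000000 := foldl_g_le token_pos R 1000000000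
  -- the final scan state
  set F := (P ++ R).foldl (pvStep token_pos) (1000000000, "") with hF
  set mid := P.foldl (pvStep token_pos) (1000000000, "") with hmid
  have hFm : F = R.foldl (pvStep token_pos) mid := by rw [hF, List.foldl_append]
  have hmid1 : mid.1 = pd := by rw [hmid, scan_fst]
  have hF1 : F.1 = min pd rd := by
    rw [hFm, scan_fst, hmid1]
    conv_lhs => rw [← min_eq_left hple]
    rw [← List.foldl_map (f := pvDist token_pos) (g := min), foldl_min_min, List.foldl_map]
  by_cases hE : (P ++ R).isEmpty
  · have hPR := List.append_eq_nil_iff.1 (List.isEmpty_iff.1 hE)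
    have h1 : pd = 1000000000 := by rw [hpd, hPR.1]; rfl
    have h2 : rd = 1000000000 := by rw [hrd, hPR.2]; rfl
    rw [if_pos hE, if_pos (by constructor <;> omega : (1000000000:Int) ≤ pd ∧ (1000000000:Int) ≤ rd)]
  · rw [if_neg hE]
    by_cases h1 : pd < 1000000000
    · by_cases h2 : pd ≤ rd
      · -- nearest occurrence is a projected keyword
        have h3 : (R.foldl (pvStep token_pos) mid).1 = mid.1 := by
          rw [← hFm, hF1, hmid1]
          exact min_eq_left h2
        have hFfix : F = mid := by rw [hFm]; exact scan_fix token_pos R mid h3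
        have hmem : F.2 ∈ PROJECTED_KEYWORDS := by
          apply keyword_positions_snd text _ _
          rw [hFfix]
          exact scan_mem token_pos P _ (by rw [hmid1]; exact h1)
        rw [if_neg (by omega : ¬ ((1000000000:Int) ≤ pd ∧ (1000000000:Int) ≤ rd)),
            if_pos h2, if_pos (hProj _ hmem)]
      · -- nearest occurrence is a realized keyword
        have h3 : (R.foldl (pvStep token_pos) mid).1 < mid.1 := by
          rw [← hFm, hF1, hmid1, min_eq_right (by omega : rd ≤ pd)]
          omega
        have hmem : F.2 ∈ REALIZED_KEYWORDS := by
          apply keyword_positions_snd text _ _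
          rw [hFm]
          exact scan_mem token_pos R mid h3
        rw [if_neg (by omega : ¬ ((1000000000:Int) ≤ pd ∧ (1000000000:Int) ≤ rd)),
            if_neg h2, if_neg (by rw [hReal2 _ hmem]; simp), if_pos (hReal1 _ hmem)]
    · by_cases h2 : rd < pd
      · -- realized wins
        have h3 : (R.foldl (pvStep token_pos) mid).1 < mid.1 := by
          rw [← hFm, hF1, hmid1, min_eq_right (by omega : rd ≤ pd)]
          omega
        have hmem : F.2 ∈ REALIZED_KEYWORDS := by
          apply keyword_positions_snd text _ _
          rw [hFm]
          exact scan_mem token_pos R mid h3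
        rw [if_neg (by omega : ¬ ((1000000000:Int) ≤ pd ∧ (1000000000:Int) ≤ rd)),
            if_neg (by omega : ¬ pd ≤ rd), if_neg (by rw [hReal2 _ hmem]; simp),
            if_pos (hReal1 _ hmem)]
      · -- every occurrence is at distance ≥ 10^9: A's scan never fires, best_kw stays ""
        have h3 : F.1 = (1000000000 : Int) := by
          rw [hF1, min_eq_left (by omega : pd ≤ rd)]
          omega
        have hFfix : F = (1000000000, "") := scan_fix token_pos (P ++ R) _ h3
        rw [if_pos (by constructor <;> omega : (1000000000:Int) ≤ pd ∧ (1000000000:Int) ≤ rd), hFfix]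
        decide

-- ===== VERDICT (by name: the statement is the Claim_ definition above) =====
theorem infer_status_spec : Claim_equal_infer_status := by
  intro text token_pos _
  exact infer_status_eq_alt text token_pos
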